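-- pv_equiv track=rewrite | github.com/lhao03/qc | min_part/operators.py | generate_occupied_spin_orb_permutations
-- ===== SOURCE A (Python) =====
-- from itertools import combinations
-- from typing import Optional, List, Tuple
--
-- def generate_occupied_spin_orb_permutations(
--     total_spin_orbs: int, occ: Optional[int] = None
-- ) -> List[Tuple[int]]:
--     possible_spin_orbs = list(range(total_spin_orbs))
--     possible_permutations = []
--     for i in possible_spin_orbs:
--         possible_permutations += list(combinations(possible_spin_orbs, i))
--     possible_permutations.append(tuple(possible_spin_orbs))
--     if occ is None:
--         return possible_permutations
--     else:
--         return list(filter(lambda t: len(t) == occ, possible_permutations))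
-- ===== SOURCE B (Python) =====
-- from itertools import combinations
-- from typing import Optional, List, Tuple
--
--
-- def generate_occupied_spin_orb_permutations(
--     total_spin_orbs: int, occ: Optional[int] = None
-- ) -> List[Tuple[int]]:
--     n = max(total_spin_orbs, 0)
--     if occ is not None:
--         # only one layer is needed: enumerate it directly
--         if occ < 0 or occ > n:
--             return []
--         return list(combinations(range(n), occ))
--     # build all layers at once, Pascal-triangle style, in one pass over the orbitals
--     layers = [[()]]
--     for x in reversed(range(n)):
--         new = []
--         for k in range(len(layers) + 1):
--             prev = [(x,) + t for t in layers[k - 1]] if k >= 1 else []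
--             cur = layers[k] if k < len(layers) else []
--             new.append(prev + cur)
--         layers = new
--     return [t for layer in layers for t in layer]
-- ===== Notes on version B (the rewrite author's own statement) =====
-- stated objective: faster
-- what changed: When occ is given B enumerates combinations(range(n), occ) directly instead of building all 2^n subsets and filtering by length; when occ is None B builds all size-layers simultaneously in a single Pascal-triangle pass over the orbitals instead of calling combinations once per size.
import Mathlib
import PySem

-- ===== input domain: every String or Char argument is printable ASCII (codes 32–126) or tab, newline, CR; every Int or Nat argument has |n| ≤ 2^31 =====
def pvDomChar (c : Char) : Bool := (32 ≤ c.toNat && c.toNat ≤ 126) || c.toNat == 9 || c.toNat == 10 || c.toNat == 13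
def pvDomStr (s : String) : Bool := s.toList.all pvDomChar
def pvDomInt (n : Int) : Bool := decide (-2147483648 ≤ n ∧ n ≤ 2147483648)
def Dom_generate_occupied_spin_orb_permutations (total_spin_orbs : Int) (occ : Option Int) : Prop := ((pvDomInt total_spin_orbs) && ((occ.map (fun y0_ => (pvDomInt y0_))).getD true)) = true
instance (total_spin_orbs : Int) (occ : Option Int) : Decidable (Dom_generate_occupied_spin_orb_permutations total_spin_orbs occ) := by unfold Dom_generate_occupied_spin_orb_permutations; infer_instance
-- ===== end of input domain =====

-- B replaces A's build-everything-then-filter with a direct enumeration of the requested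
-- layer when occ is given (asymptotically faster there) and a one-pass Pascal-triangle
-- construction of all layers when occ is None.

-- ===== PORT A =====
-- itertools.combinations(xs, k) in lexicographic order (exact port of its semantics;
-- shared by both ports: A calls it once per size, B calls it once).
def pyCombinations : List Int → Nat → List (List Int)
  | _, 0 => [[]]
  | [], _ + 1 => []
  | x :: xs, k + 1 => (pyCombinations xs k).map (fun t => x :: t) ++ pyCombinations xs (k + 1)

def generate_occupied_spin_orb_permutations (total_spin_orbs : Int) (occ : Option Int) : List (List Int) :=
  let possible_spin_orbs := PySem.List.pyRange 0 total_spin_orbs 1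
  -- i ranges over range(total_spin_orbs), hence 0 ≤ i: i.toNat is exact here
  let possible_permutations :=
    possible_spin_orbs.foldl (fun acc i => acc ++ pyCombinations possible_spin_orbs i.toNat) []
  let possible_permutations := possible_permutations ++ [possible_spin_orbs]
  match occ with
  | none => possible_permutations
  | some m => possible_permutations.filter (fun t => (t.length : Int) == m)

-- ===== PORT B =====
-- one step of the Pascal-triangle pass: layers-by-size of xs become layers-by-size of x::xs
def pascalStep (x : Int) (layers : List (List (List Int))) : List (List (List Int)) :=
  (List.range (layers.length + 1)).map (fun k =>
    (if 1 ≤ k then (layers.getD (k - 1) []).map (fun t => x :: t) else []) ++ layers.getD k [])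

def generate_occupied_spin_orb_permutations_alt (total_spin_orbs : Int) (occ : Option Int) : List (List Int) :=
  let n := max total_spin_orbs 0
  match occ with
  | some m =>
    if m < 0 ∨ n < m then []
    else pyCombinations (PySem.List.pyRange 0 n 1) m.toNat
  | none =>
    let layers := (PySem.List.pyRange 0 n 1).reverse.foldl
      (fun ls x => pascalStep x ls) [[[]]]
    layers.flatten

-- ===== PRECONDITION & SPEC =====
def Spec_generate_occupied_spin_orb_permutations (total_spin_orbs : Int) (occ : Option Int) (out : List (List Int)) : Prop := out = generate_occupied_spin_orb_permutations_alt total_spin_orbs occ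
instance (total_spin_orbs : Int) (occ : Option Int) (out : List (List Int)) : Decidable (Spec_generate_occupied_spin_orb_permutations total_spin_orbs occ out) := by unfold Spec_generate_occupied_spin_orb_permutations; infer_instance

-- ===== CLAIM (what is proved, stated in full; the proofs are below) =====
def Claim_equal_generate_occupied_spin_orb_permutations : Prop := ∀ (total_spin_orbs : Int) (occ : Option Int), Dom_generate_occupied_spin_orb_permutations total_spin_orbs occ → Spec_generate_occupied_spin_orb_permutations total_spin_orbs occ (generate_occupied_spin_orb_permutations total_spin_orbs occ)

-- ===== LEMMAS AND PROOFS =====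

lemma comb_eq_nil_of_lt : ∀ (xs : List Int) (k : Nat), xs.length < k → pyCombinations xs k = [] := by
  intro xs
  induction xs with
  | nil => intro k hk; cases k with
    | zero => omega
    | succ j => rfl
  | cons x xs ih =>
    intro k hk
    cases k with
    | zero => omega
    | succ j =>
      simp only [pyCombinations]
      rw [ih j (by simp at hk; omega), ih (j + 1) (by simp at hk; omega)]
      simp

lemma comb_self : ∀ (xs : List Int), pyCombinations xs xs.length = [xs] := by
  intro xs
  induction xs with
  | nil => rfl
  | cons x xs ih =>
    simp only [List.length_cons, pyCombinations, ih,
      comb_eq_nil_of_lt xs (xs.length + 1) (by omega)]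
    simp

lemma comb_mem_length : ∀ (xs : List Int) (k : Nat) (t : List Int),
    t ∈ pyCombinations xs k → t.length = k := by
  intro xs
  induction xs with
  | nil =>
    intro k t ht
    cases k with
    | zero => simp [pyCombinations] at ht; simp [ht]
    | succ j => simp [pyCombinations] at ht
  | cons x xs ih =>
    intro k t ht
    cases k with
    | zero => simp [pyCombinations] at ht; simp [ht]
    | succ j =>
      simp only [pyCombinations, List.mem_append, List.mem_map] at ht
      rcases ht with ⟨s, hs, rfl⟩ | h
      · simp [ih j s hs]
      · exact ih (j + 1) t h

lemma getD_map_range {α : Type} (f : Nat → α) (m j : Nat) (d : α) :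
    ((List.range m).map f).getD j d = if j < m then f j else d := by
  rcases lt_or_ge j m with h | h
  · rw [List.getD_eq_getElem _ _ (by simpa using h)]
    simp [h]
  · rw [List.getD_eq_default _ _ (by simpa using h)]
    simp [Nat.not_lt.mpr h]

lemma pascalStep_spec (x : Int) (xs : List Int) :
    pascalStep x ((List.range (xs.length + 1)).map (pyCombinations xs))
      = (List.range (xs.length + 2)).map (pyCombinations (x :: xs)) := by
  unfold pascalStep
  rw [List.length_map, List.length_range]
  apply List.map_congr_left
  intro k hk
  rw [List.mem_range] at hk
  cases k with
  | zero => simp [pyCombinations]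
  | succ j =>
    rw [getD_map_range, getD_map_range]
    simp only [Nat.add_sub_cancel, if_pos (by omega : j < xs.length + 1)]
    by_cases hj : j + 1 < xs.length + 1
    · simp [pyCombinations, hj]
    · have : j + 1 = xs.length + 1 := by omega
      simp [pyCombinations, this, comb_eq_nil_of_lt xs (xs.length + 1) (by omega)]

lemma pascal_layers_spec : ∀ (xs : List Int),
    xs.reverse.foldl (fun ls x => pascalStep x ls) [[[]]]
      = (List.range (xs.length + 1)).map (pyCombinations xs) := by
  intro xs
  induction xs with
  | nil => rfl
  | cons x xs ih =>
    rw [List.reverse_cons, List.foldl_append, ih]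
    simp only [List.foldl_cons, List.foldl_nil]
    rw [pascalStep_spec]
    simp [List.length_cons]

lemma flatMap_range_ite {α : Type} (k : Nat) (v : List α) : ∀ (m : Nat),
    (List.range m).flatMap (fun j => if j = k then v else []) = if k < m then v else [] := by
  intro m
  induction m with
  | zero => simp
  | succ m ih =>
    rw [List.range_succ, List.flatMap_append, ih]
    have h1 : (List.flatMap (fun j => if j = k then v else []) [m]) = if m = k then v else [] := by
      simp
    rw [h1]
    split_ifs with h2 h3 h4 <;> simp_all <;> omega

-- the full subset list both programs are rearrangements of
lemma a_perms_eq (n : Int) :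
    ((PySem.List.pyRange 0 n 1).foldl
        (fun acc i => acc ++ pyCombinations (PySem.List.pyRange 0 n 1) i.toNat) [])
      ++ [PySem.List.pyRange 0 n 1]
      = (List.range (n.toNat + 1)).flatMap (pyCombinations (PySem.List.pyRange 0 n 1)) := by
  set possible := PySem.List.pyRange 0 n 1 with hposs
  have hlen : possible.length = n.toNat := by
    simp [hposs, PySem.List.length_pyRange_one]
  rw [PySem.List.foldl_append_eq_flatMap]
  have hmap : possible = (List.range n.toNat).map (fun k : Nat => ((k : Int))) := by
    rw [hposs, PySem.List.pyRange_one]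
    simp
  rw [List.nil_append, List.range_succ, List.flatMap_append]
  congr 1
  · conv_lhs => rw [hmap]
    rw [List.flatMap_map]
    simp [← hmap]
  · simp [← hlen, comb_self]

lemma filter_flatMap' {α β : Type} (l : List α) (f : α → List β) (p : β → Bool) :
    (l.flatMap f).filter p = l.flatMap (fun a => (f a).filter p) := by
  induction l with
  | nil => rfl
  | cons x xs ih => simp [List.flatMap_cons, List.filter_append, ih]

lemma filter_comb (xs : List Int) (m : Int) (hm : 0 ≤ m) (j : Nat) :
    (pyCombinations xs j).filter (fun t => (t.length : Int) == m)
      = if j = m.toNat then pyCombinations xs j else [] := by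
  by_cases hj : j = m.toNat
  · rw [if_pos hj]
    apply List.filter_eq_self.mpr
    intro t ht
    rw [comb_mem_length xs j t ht]
    simp [hj, Int.toNat_of_nonneg hm]
  · rw [if_neg hj]
    apply List.filter_eq_nil_iff.mpr
    intro t ht
    rw [comb_mem_length xs j t ht]
    simp only [beq_iff_eq]
    omega

lemma pyRange_max (t : Int) :
    PySem.List.pyRange 0 (max t 0) 1 = PySem.List.pyRange 0 t 1 := by
  rw [PySem.List.pyRange_one, PySem.List.pyRange_one]
  have h : (max t 0 - 0).toNat = (t - 0).toNat := by omega
  rw [h]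

theorem main_eq (n : Int) (occ : Option Int) :
    generate_occupied_spin_orb_permutations n occ
      = generate_occupied_spin_orb_permutations_alt n occ := by
  have hlen : (PySem.List.pyRange 0 n 1).length = n.toNat := by
    simp [PySem.List.length_pyRange_one]
  cases occ with
  | none =>
    simp only [generate_occupied_spin_orb_permutations,
      generate_occupied_spin_orb_permutations_alt]
    rw [pyRange_max, a_perms_eq, pascal_layers_spec, hlen]
    simp [List.flatMap_def]
  | some m =>
    simp only [generate_occupied_spin_orb_permutations,
      generate_occupied_spin_orb_permutations_alt]
    rw [pyRange_max, a_perms_eq, filter_flatMap']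
    by_cases hm : m < 0
    · rw [if_pos (Or.inl hm)]
      have h0 : (fun j => (pyCombinations (PySem.List.pyRange 0 n 1) j).filter
            (fun t => (t.length : Int) == m)) = fun _ => ([] : List (List Int)) := by
        funext j
        apply List.filter_eq_nil_iff.mpr
        intro t ht
        rw [comb_mem_length _ j t ht]
        simp only [beq_iff_eq]
        omega
      rw [h0]
      simp
    · have hcongr : (fun j => (pyCombinations (PySem.List.pyRange 0 n 1) j).filter
            (fun t => (t.length : Int) == m))
          = fun j => if j = m.toNat then pyCombinations (PySem.List.pyRange 0 n 1) m.toNat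
              else [] := by
        funext j
        rw [filter_comb _ m (by omega) j]
        split_ifs with h
        · rw [h]
        · rfl
      rw [hcongr, flatMap_range_ite]
      by_cases h2 : max n 0 < m
      · rw [if_pos (Or.inr h2), if_neg (by omega : ¬ m.toNat < n.toNat + 1)]
      · rw [if_neg (by omega : ¬ (m < 0 ∨ max n 0 < m)),
          if_pos (by omega : m.toNat < n.toNat + 1)]

-- ===== VERDICT (by name: the statement is the Claim_ definition above) =====
theorem generate_occupied_spin_orb_permutations_spec : Claim_equal_generate_occupied_spin_orb_permutations := by
  intro n occ _
  exact main_eq n occ
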